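-- pv_equiv track=rewrite | github.com/JustinMLouie/Crystal-Transformations | latticeMismatch.py | calculateIndividualMVals
-- ===== SOURCE A (Python) =====
-- def calculateIndividualMVals(n):
--
-- 	"""
-- 	STEP 3
-- 	Determines the potential M matrices that represents the transformations
-- 	to get from L1 to L2
-- 	Equation 2.3 of Lattice Match: An Application to heteroepitaxy
-- 	Example shown in  3.2 and 3.3
--
-- 	Formula:
-- 	  L2    =    M      *   L1 - is a square matrix so might be able to take inverse
-- 	| a2 | = | i j | * | a1 |
-- 	| b2 |   | 0 m |   | b1 |
--
-- 	Where:
-- 	i * m = n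
-- 	i, m > 0
-- 	0 <= j <= m - 1
-- 	n = integer number obtained from rationalizeRatio()
--
-- 	x1 = i
-- 	x2 = j
-- 	x3 = m
--
-- 	"""
--
-- 	m = [[0, 0], [0, 0]]
--
-- 	solutions = []
--
-- 	for x3 in range(0, n + 1):
-- 		for x1 in range(0, n + 1):
-- 			for x2 in range(0, n + 1):
-- 				if ((x1 * x3 == n) and (x2 <= (x3 - 1))):
-- 					solutions.append([[x1, x2], [0,x3]])
--
-- 	return solutions
-- ===== SOURCE B (Python) =====
-- def calculateIndividualMVals(n):
--     divisors = [d for d in range(1, n + 1) if n % d == 0]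
--     return [[[n // d, j], [0, d]] for d in divisors for j in range(d)]
-- ===== Notes on version B (the rewrite author's own statement) =====
-- stated objective: faster
-- what changed: Replaced the triple nested accumulator scan over 0..n by a two-stage comprehension: first build the sorted list of divisors d of n, then emit [[n//d, j],[0,d]] for j in range(d) via nested comprehensions (no accumulator loop).
import Mathlib
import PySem

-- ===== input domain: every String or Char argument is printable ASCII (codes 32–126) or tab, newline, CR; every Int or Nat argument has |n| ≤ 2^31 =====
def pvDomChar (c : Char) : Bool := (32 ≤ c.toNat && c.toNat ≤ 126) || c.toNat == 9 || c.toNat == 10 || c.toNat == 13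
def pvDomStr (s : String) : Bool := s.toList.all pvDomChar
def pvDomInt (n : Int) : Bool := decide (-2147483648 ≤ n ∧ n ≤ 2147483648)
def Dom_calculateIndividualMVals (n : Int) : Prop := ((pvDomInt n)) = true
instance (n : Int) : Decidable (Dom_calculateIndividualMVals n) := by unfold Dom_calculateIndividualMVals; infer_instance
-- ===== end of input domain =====

-- B replaces A's triple nested accumulator scan over 0..n by two comprehension stages:
-- the divisor list of n, then a nested flatMap/map emitting the matrices (asymptotically faster).

-- ===== PORT A =====
def calculateIndividualMVals (n : Int) : List (List (List Int)) :=
  (PySem.List.pyRange 0 (n + 1) 1).foldl (fun sols x3 =>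
    (PySem.List.pyRange 0 (n + 1) 1).foldl (fun sols x1 =>
      (PySem.List.pyRange 0 (n + 1) 1).foldl (fun sols x2 =>
        if x1 * x3 = n ∧ x2 ≤ x3 - 1 then sols ++ [[[x1, x2], [0, x3]]] else sols)
        sols) sols) []

-- ===== PORT B =====
def calculateIndividualMVals_alt (n : Int) : List (List (List Int)) :=
  let divisors := (PySem.List.pyRange 1 (n + 1) 1).filter (fun d => decide (PySem.Int.mod n d = 0))
  divisors.flatMap (fun d =>
    (PySem.List.pyRange 0 d 1).map (fun j => [[PySem.Int.floordiv n d, j], [0, d]]))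

-- ===== PRECONDITION & SPEC =====
def Spec_calculateIndividualMVals (n : Int) (out : List (List (List Int))) : Prop := out = calculateIndividualMVals_alt n
instance (n : Int) (out : List (List (List Int))) : Decidable (Spec_calculateIndividualMVals n out) := by unfold Spec_calculateIndividualMVals; infer_instance

-- ===== CLAIM (what is proved, stated in full; the proofs are below) =====
def Claim_equal_calculateIndividualMVals : Prop := ∀ (n : Int), Dom_calculateIndividualMVals n → Spec_calculateIndividualMVals n (calculateIndividualMVals n)

-- ===== LEMMAS AND PROOFS =====

-- flatMap over a filtered list = flatMap of the guarded function
lemma flatMap_filter {α β : Type} (l : List α) (p : α → Bool) (f : α → List β) :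
    (l.filter p).flatMap f = l.flatMap (fun x => if p x then f x else []) := by
  induction l with
  | nil => rfl
  | cons a t ih =>
    by_cases h : p a
    · simp [h, ih]
    · simp [h, ih]

-- filter (· ≤ c) on a range a..b-1 with a ≤ c+1 ≤ b keeps exactly a..c
lemma filter_le_pyRange (a b c : Int) (h1 : a ≤ c + 1) (h2 : c + 1 ≤ b) :
    (PySem.List.pyRange a b 1).filter (fun x => decide (x ≤ c)) =
      PySem.List.pyRange a (c + 1) 1 := by
  rw [PySem.List.pyRange_one_append a (c + 1) b h1 h2, List.filter_append]
  have hl : (PySem.List.pyRange a (c + 1) 1).filter (fun x => decide (x ≤ c)) =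
      PySem.List.pyRange a (c + 1) 1 := by
    apply List.filter_eq_self.2
    intro x hx
    have := (PySem.List.mem_pyRange_one).1 hx
    simpa using by omega
  have hr : (PySem.List.pyRange (c + 1) b 1).filter (fun x => decide (x ≤ c)) = [] := by
    apply List.filter_eq_nil_iff.2
    intro x hx
    have := (PySem.List.mem_pyRange_one).1 hx
    simpa using by omega
  rw [hl, hr, List.append_nil]

-- flatMap of "if x = c then M x else []" over a range containing c collapses to M c
lemma flatMap_eq_singleton {α : Type} (a b c : Int) (M : Int → List α)
    (h1 : a ≤ c) (h2 : c < b) :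
    (PySem.List.pyRange a b 1).flatMap (fun x => if x = c then M x else []) = M c := by
  rw [PySem.List.pyRange_one_append a c b h1 (by omega),
      PySem.List.pyRange_one_cons (show c < b by omega), List.flatMap_append, List.flatMap_cons]
  have hl : (PySem.List.pyRange a c 1).flatMap (fun x => if x = c then M x else []) = [] := by
    apply List.flatMap_eq_nil_iff.2
    intro x hx
    have := (PySem.List.mem_pyRange_one).1 hx
    simp only [if_neg (by omega : ¬ x = c)]
  have hr : (PySem.List.pyRange (c + 1) b 1).flatMap (fun x => if x = c then M x else []) = [] := by
    apply List.flatMap_eq_nil_iff.2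
    intro x hx
    have := (PySem.List.mem_pyRange_one).1 hx
    simp only [if_neg (by omega : ¬ x = c)]
  simp [hl, hr]

-- A's inner double loop, for a fixed x3 with 1 ≤ x3 ≤ n, computes B's guarded body for x3
lemma inner_eq_body (n x3 : Int) (hx1 : 1 ≤ x3) (hx2 : x3 ≤ n) :
    ((PySem.List.pyRange 0 (n + 1) 1).flatMap fun x1 =>
      ((PySem.List.pyRange 0 (n + 1) 1).filter fun x2 =>
        decide (x1 * x3 = n ∧ x2 ≤ x3 - 1)).map fun x2 => [[x1, x2], [0, x3]]) =
    (if PySem.Int.mod n x3 = 0 then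
      (PySem.List.pyRange 0 x3 1).map fun x2 => [[PySem.Int.floordiv n x3, x2], [0, x3]]
    else []) := by
  have hx3pos : (0 : Int) < x3 := hx1
  by_cases hdvd : PySem.Int.mod n x3 = 0
  · have hdvd' : x3 ∣ n := (PySem.Int.mod_eq_zero_iff_dvd n x3).1 hdvd
    have hfd : PySem.Int.floordiv n x3 = n / x3 :=
      PySem.Int.floordiv_eq_ediv_of_pos hx3pos
    have hc : (n / x3) * x3 = n := Int.ediv_mul_cancel hdvd'
    have hkey : ∀ x1 : Int, (x1 * x3 = n) ↔ x1 = n / x3 := by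
      intro x1
      constructor
      · intro h
        have : x1 * x3 = (n / x3) * x3 := by omega
        exact mul_right_cancel₀ (by omega) this
      · intro h; rw [h, hc]
    have hstep : ∀ x1 : Int,
        (((PySem.List.pyRange 0 (n + 1) 1).filter fun x2 =>
          decide (x1 * x3 = n ∧ x2 ≤ x3 - 1)).map fun x2 => [[x1, x2], [0, x3]]) =
        (if x1 = n / x3 then
          (PySem.List.pyRange 0 x3 1).map fun x2 => [[x1, x2], [0, x3]] else []) := by
      intro x1
      by_cases hx : x1 = n / x3
      · rw [if_pos hx]
        have : ((PySem.List.pyRange 0 (n + 1) 1).filter fun x2 =>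
            decide (x1 * x3 = n ∧ x2 ≤ x3 - 1)) =
            (PySem.List.pyRange 0 (n + 1) 1).filter fun x2 => decide (x2 ≤ x3 - 1) := by
          apply List.filter_congr
          intro x2 _
          simp [(hkey x1).2 hx]
        rw [this]
        have := filter_le_pyRange 0 (n + 1) (x3 - 1) (by omega) (by omega)
        simp only [show x3 - 1 + 1 = x3 by ring] at this
        rw [this]
      · rw [if_neg hx]
        have : ((PySem.List.pyRange 0 (n + 1) 1).filter fun x2 =>
            decide (x1 * x3 = n ∧ x2 ≤ x3 - 1)) = [] := by
          apply List.filter_eq_nil_iff.2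
          intro x2 _
          simp
          intro h
          exact absurd ((hkey x1).1 h) hx
        rw [this, List.map_nil]
    rw [if_pos hdvd]
    calc ((PySem.List.pyRange 0 (n + 1) 1).flatMap fun x1 =>
          ((PySem.List.pyRange 0 (n + 1) 1).filter fun x2 =>
            decide (x1 * x3 = n ∧ x2 ≤ x3 - 1)).map fun x2 => [[x1, x2], [0, x3]])
        = (PySem.List.pyRange 0 (n + 1) 1).flatMap fun x1 =>
            (if x1 = n / x3 then
              (PySem.List.pyRange 0 x3 1).map fun x2 => [[x1, x2], [0, x3]] else []) := by
          apply List.flatMap_congr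
          intro x1 _
          exact hstep x1
      _ = (PySem.List.pyRange 0 x3 1).map fun x2 => [[n / x3, x2], [0, x3]] := by
          apply flatMap_eq_singleton 0 (n + 1) (n / x3)
            (fun x1 => (PySem.List.pyRange 0 x3 1).map fun x2 => [[x1, x2], [0, x3]])
          · exact Int.ediv_nonneg (by omega) (by omega)
          · have : n / x3 ≤ n := by
              have h1 : 1 * (n / x3) ≤ x3 * (n / x3) := by
                apply mul_le_mul_of_nonneg_right hx1
                exact Int.ediv_nonneg (by omega) (by omega)
              calc n / x3 = 1 * (n / x3) := by ring
                _ ≤ x3 * (n / x3) := h1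
                _ = n := by rw [mul_comm]; exact hc
            omega
      _ = _ := by rw [hfd]
  · rw [if_neg hdvd]
    apply List.flatMap_eq_nil_iff.2
    intro x1 _
    have : ((PySem.List.pyRange 0 (n + 1) 1).filter fun x2 =>
        decide (x1 * x3 = n ∧ x2 ≤ x3 - 1)) = [] := by
      apply List.filter_eq_nil_iff.2
      intro x2 _
      simp
      intro h
      exfalso
      apply hdvd
      exact (PySem.Int.mod_eq_zero_iff_dvd n x3).2 ⟨x1, by rw [← h, mul_comm]⟩
    rw [this, List.map_nil]

-- A as one flatMap over x3
lemma portA_flatMap (n : Int) :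
    calculateIndividualMVals n =
      (PySem.List.pyRange 0 (n + 1) 1).flatMap (fun x3 =>
        (PySem.List.pyRange 0 (n + 1) 1).flatMap fun x1 =>
          ((PySem.List.pyRange 0 (n + 1) 1).filter fun x2 =>
            decide (x1 * x3 = n ∧ x2 ≤ x3 - 1)).map fun x2 => [[x1, x2], [0, x3]]) := by
  unfold calculateIndividualMVals
  simp only [PySem.List.foldl_append_ite, PySem.List.foldl_append_eq_flatMap,
    List.nil_append]

-- B as one guarded flatMap over x3
lemma portB_flatMap (n : Int) :
    calculateIndividualMVals_alt n =
      (PySem.List.pyRange 1 (n + 1) 1).flatMap (fun x3 =>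
        if PySem.Int.mod n x3 = 0 then
          (PySem.List.pyRange 0 x3 1).map fun x2 =>
            [[PySem.Int.floordiv n x3, x2], [0, x3]]
        else []) := by
  unfold calculateIndividualMVals_alt
  rw [flatMap_filter]
  apply List.flatMap_congr
  intro d _
  by_cases h : PySem.Int.mod n d = 0 <;> simp [h]

-- splitting off x3 = 0 from A's outer loop
lemma flatMap_range_shift {α : Type} (n : Int) (hn : 0 ≤ n) (F G : Int → List α)
    (h0 : F 0 = []) (h : ∀ x3, 1 ≤ x3 → x3 ≤ n → F x3 = G x3) :
    (PySem.List.pyRange 0 (n + 1) 1).flatMap F = (PySem.List.pyRange 1 (n + 1) 1).flatMap G := by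
  rw [PySem.List.pyRange_one_cons (by omega : (0:Int) < n + 1), List.flatMap_cons, h0,
    List.nil_append]
  apply List.flatMap_congr
  intro x3 hx3
  have hb := (PySem.List.mem_pyRange_one).1 hx3
  exact h x3 (by omega) (by omega)

-- ===== VERDICT (by name: the statement is the Claim_ definition above) =====
theorem calculateIndividualMVals_spec : Claim_equal_calculateIndividualMVals := by
  intro n _
  unfold Spec_calculateIndividualMVals
  rw [portA_flatMap, portB_flatMap]
  by_cases hn : 0 ≤ n
  · apply flatMap_range_shift n hn
    · apply List.flatMap_eq_nil_iff.2
      intro x1 _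
      have : ((PySem.List.pyRange 0 (n + 1) 1).filter fun x2 =>
          decide (x1 * 0 = n ∧ x2 ≤ 0 - 1)) = [] := by
        apply List.filter_eq_nil_iff.2
        intro x2 hx2
        have := (PySem.List.mem_pyRange_one).1 hx2
        simp
        omega
      rw [this, List.map_nil]
    · intro x3 h1 h2
      exact inner_eq_body n x3 h1 h2
  · rw [PySem.List.pyRange_one_eq_nil (a := 0) (b := n + 1) (by omega),
        PySem.List.pyRange_one_eq_nil (a := 1) (b := n + 1) (by omega)]
    simp
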